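-- pv_equiv track=rewrite | github.com/phanrahan/clock_calculus | clock.py | on
-- ===== SOURCE A (Python) =====
-- def on(x, y):
--     if not y:
--         return []
--     if x[0] == 0:
--         return [0] + on(x[1:], y)
--     else:
--         if y[0]:
--             return [1] + on(x[1:], y[1:])
--         else:
--             return [0] + on(x[1:], y[1:])
-- ===== SOURCE B (Python) =====
-- def on(x, y):
--     res = []
--     i = 0
--     j = 0
--     n = len(y)
--     while j < n:
--         if x[i] == 0:
--             res.append(0)
--         else:
--             res.append(1 if y[j] else 0)
--             j += 1
--         i += 1
--     return res
-- ===== Notes on version B (the rewrite author's own statement) =====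
-- stated objective: faster
-- what changed: Replaced the slicing recursion (each step copies x[1:]/y[1:]) with a single-pass two-index loop appending to a result list.
import Mathlib
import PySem

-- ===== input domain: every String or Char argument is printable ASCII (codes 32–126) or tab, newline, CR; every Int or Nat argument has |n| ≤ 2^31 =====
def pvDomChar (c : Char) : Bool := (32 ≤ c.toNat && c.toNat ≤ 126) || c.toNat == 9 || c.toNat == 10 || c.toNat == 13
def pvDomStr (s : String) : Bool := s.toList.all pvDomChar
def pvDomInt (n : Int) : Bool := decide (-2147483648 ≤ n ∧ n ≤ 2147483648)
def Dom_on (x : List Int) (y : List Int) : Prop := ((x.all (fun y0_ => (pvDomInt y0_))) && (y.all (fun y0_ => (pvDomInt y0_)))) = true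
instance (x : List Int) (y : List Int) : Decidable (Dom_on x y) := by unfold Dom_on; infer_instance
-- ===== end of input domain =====

-- B replaces A's O(n^2) slicing recursion with a one-pass two-index loop (asymptotically faster).

-- ===== PORT A =====
-- Literal port of A's recursion; when y is nonempty and x is empty Python's x[0]
-- raises IndexError, so that arm (excluded by Pre_on) returns [].
def on (x : List Int) (y : List Int) : List Int :=
  match x, y with
  | _, [] => []
  | [], _ :: _ => []   -- Python: IndexError on x[0]; outside Pre_on
  | a :: xs, b :: ys =>
    if a = 0 then 0 :: on xs (b :: ys)
    else if b ≠ 0 then 1 :: on xs ys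
    else 0 :: on xs ys

-- ===== PORT B =====
-- Loop body of Source B: while j < len(y), read x[i]; the out-of-range arm is
-- Python's IndexError on x[i] (outside Pre_on).
def onAltGo (x : List Int) (y : List Int) (i j : Nat) (res : List Int) : List Int :=
  if j < y.length then
    if hi : i < x.length then
      if x[i] = 0 then onAltGo x y (i + 1) j (res ++ [0])
      else onAltGo x y (i + 1) (j + 1) (res ++ [if y.getD j 0 ≠ 0 then 1 else 0])
    else res   -- Python: IndexError on x[i]; outside Pre_on
  else res
termination_by x.length - i
decreasing_by all_goals omega

def on_alt (x : List Int) (y : List Int) : List Int := onAltGo x y 0 0 []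

-- ===== PRECONDITION & SPEC =====
-- A (and B) raise IndexError exactly when y needs more nonzero bits than x has:
-- Pre_on admits precisely the inputs on which the Python A returns.
def Pre_on (x : List Int) (y : List Int) : Prop :=
  y.length ≤ (x.filter (fun a => a ≠ 0)).length
instance (x : List Int) (y : List Int) : Decidable (Pre_on x y) := by unfold Pre_on; infer_instance

def pvWitness_on : List Int × List Int := ([1, 0, 1], [1, 0])

def Spec_on (x : List Int) (y : List Int) (out : List Int) : Prop := out = on_alt x y
instance (x : List Int) (y : List Int) (out : List Int) : Decidable (Spec_on x y out) := by unfold Spec_on; infer_instance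

-- ===== CLAIM (what is proved, stated in full; the proofs are below) =====
def Claim_equal_on : Prop := ∀ (x : List Int) (y : List Int), Dom_on x y → Pre_on x y → Spec_on x y (on x y)

-- ===== LEMMAS AND PROOFS =====

lemma on_nil_right (x : List Int) : on x [] = [] := by
  cases x <;> simp [on]

lemma onAltGo_eq (x y : List Int) (i j : Nat) (res : List Int) :
    y.length - j ≤ ((x.drop i).filter (fun a => a ≠ 0)).length →
    onAltGo x y i j res = res ++ on (x.drop i) (y.drop j) := by
  induction i, j, res using onAltGo.induct x y with
  | case1 i j res hj hi hz ih =>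
    -- x[i] = 0 branch: emit 0, keep j
    intro hpre
    have hdx : x.drop i = x[i] :: x.drop (i + 1) := List.drop_eq_getElem_cons hi
    have hdy : y.drop j = y[j] :: y.drop (j + 1) := List.drop_eq_getElem_cons hj
    have hpre' : y.length - j ≤ ((x.drop (i + 1)).filter (fun a => a ≠ 0)).length := by
      rw [hdx, hz, List.filter_cons, if_neg (by simp)] at hpre
      exact hpre
    rw [onAltGo, if_pos hj, dif_pos hi, if_pos hz, ih hpre', hdx, hz, hdy]
    simp [on, List.append_assoc]
  | case2 i j res hj hi hz ih =>
    -- x[i] ≠ 0 branch: emit the bit of y[j], advance j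
    intro hpre
    have hdx : x.drop i = x[i] :: x.drop (i + 1) := List.drop_eq_getElem_cons hi
    have hdy : y.drop j = y[j] :: y.drop (j + 1) := List.drop_eq_getElem_cons hj
    have hpre' : y.length - (j + 1) ≤ ((x.drop (i + 1)).filter (fun a => a ≠ 0)).length := by
      rw [hdx, List.filter_cons, if_pos (by simpa using hz)] at hpre
      rw [List.length_cons] at hpre
      omega
    simp only [dite_eq_ite] at ih
    rw [onAltGo, if_pos hj, dif_pos hi, if_neg hz, ih hpre', hdx, hdy]
    by_cases hb : y[j] = 0
    · simp [on, hz, hb, List.getElem?_eq_getElem hj, List.append_assoc]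
    · simp [on, hz, hb, List.getElem?_eq_getElem hj, List.append_assoc]
  | case3 i j res hj hi =>
    -- x exhausted while j < len(y): contradicts the precondition
    intro hpre
    exfalso
    rw [List.drop_eq_nil_of_le (by omega : x.length ≤ i)] at hpre
    simp at hpre
    omega
  | case4 i j res hj =>
    -- j ≥ len(y): loop ends, and on _ [] = []
    intro _
    rw [onAltGo, if_neg hj,
      List.drop_eq_nil_of_le (show y.length ≤ j by omega), on_nil_right]
    simp

-- ===== VERDICT (by name: the statement is the Claim_ definition above) =====
theorem on_spec : Claim_equal_on := by
  intro x y _ hpre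
  unfold Pre_on at hpre
  unfold Spec_on on_alt
  rw [onAltGo_eq x y 0 0 [] (by simpa using hpre)]
  simp
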